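-- pv_equiv track=rewrite | github.com/shaneholloman/surya | surya/common/surya/processor/tokenizer.py | _build_escape_patterns
-- ===== SOURCE A (Python) =====
-- def _build_escape_patterns(math_token_to_rawid):
--     """Build pattern list from vocab commands that start with control characters.
--
--     Scans the math vocab for LaTeX commands that could be corrupted by JSON
--     escape sequence interpretation (e.g., \\begin becomes <backspace>egin).
--     """
--     control_chars = {
--         '\x08': 'b',  # backspace
--         '\t': 't',    # tab
--         '\n': 'n',    # newline
--         '\r': 'r',    # carriage return
--         '\f': 'f',    # form feed
--         '\x07': 'a',  # bell
--         '\x0b': 'v',  # vertical tab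
--     }
--
--     patterns = {char: [] for char in control_chars}
--
--     for token in math_token_to_rawid.keys():
--         if token.startswith('\\') and len(token) > 1:
--             letter = token[1:2]  # First char after backslash
--             for ctrl_char, ctrl_letter in control_chars.items():
--                 if letter == ctrl_letter:
--                     # This token could be corrupted: \token -> <ctrl>oken
--                     suffix = token[2:]  # Everything after \X
--                     patterns[ctrl_char].append((suffix, token))
--
--     # Sort by length (longest first) to avoid partial matches
--     for char in patterns:
--         patterns[char].sort(key=lambda x: len(x[0]), reverse=True)
--
--     return patterns
-- ===== SOURCE B (Python) =====
-- def _build_escape_patterns(math_token_to_rawid):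
--     """Counting-sort formulation: group matching tokens into per-control-char
--     dicts keyed by suffix length, track the global maximum length, then emit
--     each bucket by counting down the lengths -- no comparison sort at all."""
--     control_chars = {
--         '\x08': 'b',  # backspace
--         '\t': 't',    # tab
--         '\n': 'n',    # newline
--         '\r': 'r',    # carriage return
--         '\f': 'f',    # form feed
--         '\x07': 'a',  # bell
--         '\x0b': 'v',  # vertical tab
--     }
--     ctrl_of = {letter: ctrl for ctrl, letter in control_chars.items()}
--
--     buckets = {ctrl: {} for ctrl in control_chars}
--     maxlen = -1
--     for token in math_token_to_rawid.keys():
--         if token.startswith('\\') and len(token) > 1 and token[1:2] in ctrl_of: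
--             suffix = token[2:]
--             n = len(suffix)
--             buckets[ctrl_of[token[1:2]]].setdefault(n, []).append((suffix, token))
--             if n > maxlen:
--                 maxlen = n
--
--     patterns = {}
--     for ctrl, by_len in buckets.items():
--         out = []
--         for n in range(maxlen, -1, -1):
--             out.extend(by_len.get(n, []))
--         patterns[ctrl] = out
--     return patterns
-- ===== Notes on version B (the rewrite author's own statement) =====
-- stated objective: alternative
-- what changed: Replaces A's per-token scan of the control-char table and seven stable comparison sorts with a counting-sort scheme: one scan groups matches into per-control-char dicts keyed by suffix length while tracking the global maximum length, then each bucket is emitted by counting the lengths down from the maximum, so no comparison sort runs at all.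
import Mathlib
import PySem

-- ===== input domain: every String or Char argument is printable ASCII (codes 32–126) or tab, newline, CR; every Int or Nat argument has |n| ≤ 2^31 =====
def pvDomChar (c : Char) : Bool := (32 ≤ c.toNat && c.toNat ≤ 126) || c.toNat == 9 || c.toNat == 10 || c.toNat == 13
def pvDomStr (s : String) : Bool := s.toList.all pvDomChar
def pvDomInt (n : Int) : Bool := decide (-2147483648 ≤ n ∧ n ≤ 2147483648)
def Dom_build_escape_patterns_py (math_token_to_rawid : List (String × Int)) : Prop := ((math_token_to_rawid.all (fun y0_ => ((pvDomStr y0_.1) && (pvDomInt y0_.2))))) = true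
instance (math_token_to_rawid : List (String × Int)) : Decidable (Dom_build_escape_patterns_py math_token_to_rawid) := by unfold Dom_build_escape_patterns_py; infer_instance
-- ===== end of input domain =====

-- B replaces A's per-token scan of the control-char table and seven stable comparison
-- sorts by a counting-sort scheme (per-control-char dicts keyed by suffix length plus a
-- running maximum length, emitted by counting down); equal return value proved
-- (objective: alternative).

-- ===== PORT A =====
-- the control_chars dict literal, in Python's insertion order (shared by both ports)
def pvCtrlA : List (String × String) :=
  [("\x08", "b"), ("\x09", "t"), ("\x0A", "n"), ("\x0D", "r"), ("\x0C", "f"), ("\x07", "a"), ("\x0B", "v")]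

def build_escape_patterns_py (math_token_to_rawid : List (String × Int)) : List (String × List (String × String)) :=
  -- patterns = {char: [] for char in control_chars}
  let patterns0 : PySem.Dict String (List (String × String)) :=
    pvCtrlA.foldl (fun d p => d.insert p.1 []) PySem.Dict.empty
  -- for token in math_token_to_rawid.keys(): (dict keys = first occurrences, in order)
  let tokens := PySem.List.dedup (math_token_to_rawid.map Prod.fst)
  let patterns := tokens.foldl (fun pats token =>
    if PySem.Str.startswith token "\\" && decide (1 < PySem.Str.len token) then
      let letter := PySem.Str.slice token (some 1) (some 2)
      -- for ctrl_char, ctrl_letter in control_chars.items():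
      pvCtrlA.foldl (fun pats cp =>
        if letter == cp.2 then
          pats.modify cp.1 [] (fun v => v ++ [(PySem.Str.slice token (some 2) none, token)])
        else pats) pats
    else pats) patterns0
  -- for char in patterns: patterns[char].sort(key=lambda x: len(x[0]), reverse=True)
  (patterns.items).map (fun p => (p.1, PySem.List.sorted p.2 (fun x => PySem.Str.len x.1) true))

-- ===== PORT B =====
def build_escape_patterns_py_alt (math_token_to_rawid : List (String × Int)) : List (String × List (String × String)) :=
  -- ctrl_of = {letter: ctrl for ctrl, letter in control_chars.items()}
  let ctrlOf : PySem.Dict String String :=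
    pvCtrlA.foldl (fun d p => d.insert p.2 p.1) PySem.Dict.empty
  -- buckets = {ctrl: {} for ctrl in control_chars}; maxlen = -1; one scan over the keys
  let buckets0 : PySem.Dict String (PySem.Dict Int (List (String × String))) :=
    pvCtrlA.foldl (fun d p => d.insert p.1 PySem.Dict.empty) PySem.Dict.empty
  let st := (PySem.List.dedup (math_token_to_rawid.map Prod.fst)).foldl (fun st token =>
      if (PySem.Str.startswith token "\\" && decide (1 < PySem.Str.len token))
          && ctrlOf.contains (PySem.Str.slice token (some 1) (some 2)) then
        let suffix := PySem.Str.slice token (some 2) none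
        let n := PySem.Str.len suffix
        -- buckets[ctrl_of[token[1:2]]].setdefault(n, []).append((suffix, token))
        (st.1.modify (ctrlOf.getD (PySem.Str.slice token (some 1) (some 2)) "") PySem.Dict.empty
            (fun inner => inner.modify n [] (fun v => v ++ [(suffix, token)])),
         -- if n > maxlen: maxlen = n
         if st.2 < n then n else st.2)
      else st) (buckets0, (-1 : Int))
  -- patterns = {}; for ctrl, by_len in buckets.items(): countdown emission, no sort
  let patterns := (st.1.items).foldl (fun pats cb =>
      pats.insert cb.1
        ((PySem.List.pyRange st.2 (-1) (-1)).foldl (fun out n => out ++ cb.2.getD n []) []))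
    PySem.Dict.empty
  patterns.items

-- ===== PRECONDITION & SPEC =====
def Spec_build_escape_patterns_py (math_token_to_rawid : List (String × Int)) (out : List (String × List (String × String))) : Prop := out = build_escape_patterns_py_alt math_token_to_rawid
instance (math_token_to_rawid : List (String × Int)) (out : List (String × List (String × String))) : Decidable (Spec_build_escape_patterns_py math_token_to_rawid out) := by unfold Spec_build_escape_patterns_py; infer_instance

-- ===== CLAIM (what is proved, stated in full; the proofs are below) =====
def Claim_equal_build_escape_patterns_py : Prop := ∀ (math_token_to_rawid : List (String × Int)), Dom_build_escape_patterns_py math_token_to_rawid → Spec_build_escape_patterns_py math_token_to_rawid (build_escape_patterns_py math_token_to_rawid)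

-- ===== LEMMAS AND PROOFS =====

-- shared vocabulary for the proofs
def pvK7 : List String := ["\x08", "\x09", "\x0A", "\x0D", "\x0C", "\x07", "\x0B"]
def pvLtc : PySem.Dict String String := pvCtrlA.foldl (fun d p => d.insert p.2 p.1) PySem.Dict.empty
def pvPat0 : PySem.Dict String (List (String × String)) := pvCtrlA.foldl (fun d p => d.insert p.1 []) PySem.Dict.empty
def pvB0 : PySem.Dict String (PySem.Dict Int (List (String × String))) :=
  pvCtrlA.foldl (fun d p => d.insert p.1 PySem.Dict.empty) PySem.Dict.empty
def pvHit (l t : String) : Bool :=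
  (PySem.Str.startswith t "\\" && decide (1 < PySem.Str.len t)) && (PySem.Str.slice t (some 1) (some 2) == l)
def pvSuffix (t : String) : String := PySem.Str.slice t (some 2) none
def pvColl (l : String) (toks : List String) : List (String × String) :=
  (toks.filter (pvHit l)).map (fun t => (pvSuffix t, t))
def pvAny (t : String) : Bool :=
  (PySem.Str.startswith t "\\" && decide (1 < PySem.Str.len t)) && pvLtc.contains (PySem.Str.slice t (some 1) (some 2))
def pvStepA (pats : PySem.Dict String (List (String × String))) (token : String) :
    PySem.Dict String (List (String × String)) :=
  if PySem.Str.startswith token "\\" && decide (1 < PySem.Str.len token) then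
    pvCtrlA.foldl (fun pats cp =>
      if PySem.Str.slice token (some 1) (some 2) == cp.2 then
        pats.modify cp.1 [] (fun v => v ++ [(PySem.Str.slice token (some 2) none, token)])
      else pats) pats
  else pats
def pvStepB (st : PySem.Dict String (PySem.Dict Int (List (String × String))) × Int) (token : String) :
    PySem.Dict String (PySem.Dict Int (List (String × String))) × Int :=
  if (PySem.Str.startswith token "\\" && decide (1 < PySem.Str.len token))
      && pvLtc.contains (PySem.Str.slice token (some 1) (some 2)) then
    (st.1.modify (pvLtc.getD (PySem.Str.slice token (some 1) (some 2)) "") PySem.Dict.empty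
        (fun inner => inner.modify (PySem.Str.len (PySem.Str.slice token (some 2) none)) []
          (fun v => v ++ [(PySem.Str.slice token (some 2) none, token)])),
     if st.2 < PySem.Str.len (PySem.Str.slice token (some 2) none)
       then PySem.Str.len (PySem.Str.slice token (some 2) none) else st.2)
  else st
-- the common normal form both ports are reduced to
def pvRHS (m : List (String × Int)) : List (String × List (String × String)) :=
  pvCtrlA.map (fun cl => (cl.1,
    (PySem.List.sorted ((PySem.List.dedup (m.map Prod.fst)).filter (pvHit cl.2))
      (fun t => PySem.Str.len (pvSuffix t)) true).map (fun t => (pvSuffix t, t))))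

-- general facts about the stable insertion sort behind sorted(…, reverse=True)
theorem pv_insertBy_map {α β : Type} (q : β → β → Bool) (f : α → β) (x : α) (l : List α) :
    PySem.List.insertBy q (f x) (l.map f) = (PySem.List.insertBy (fun a c => q (f a) (f c)) x l).map f := by
  induction l with
  | nil => rfl
  | cons a l ih =>
    simp only [List.map_cons, PySem.List.insertBy]
    by_cases h : q (f x) (f a) = true <;> simp [h, ih]

theorem pv_sorted_rev_map {α β κ : Type} [LinearOrder κ] (f : α → β) (key : β → κ) (l : List α) :
    PySem.List.sorted (l.map f) key true = (PySem.List.sorted l (fun a => key (f a)) true).map f := by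
  rw [PySem.List.sorted_rev_eq_foldl_insertBy, PySem.List.sorted_rev_eq_foldl_insertBy, List.foldl_map]
  suffices h : ∀ acc : List α,
      l.foldl (fun acc x => PySem.List.insertBy (fun a b => decide (key b < key a)) (f x) acc) (acc.map f)
        = (l.foldl (fun acc x => PySem.List.insertBy (fun a b => decide (key (f b) < key (f a))) x acc) acc).map f by
    simpa using h []
  induction l with
  | nil => intro acc; rfl
  | cons a l ih =>
    intro acc
    simp only [List.foldl_cons]
    rw [pv_insertBy_map (fun a b => decide (key b < key a)) f a acc]
    exact ih _

theorem pv_sorted_rev_append_singleton {α κ : Type} [LinearOrder κ] (xs : List α) (x : α) (key : α → κ) :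
    PySem.List.sorted (xs ++ [x]) key true =
      PySem.List.insertBy (fun a b => decide (key b < key a)) x (PySem.List.sorted xs key true) := by
  simp only [PySem.List.sorted_rev_eq_foldl_insertBy, List.foldl_append, List.foldl_cons, List.foldl_nil]

theorem pv_insertBy_split {α : Type} (q : α → α → Bool) (x : α) (u v : List α)
    (hu : ∀ a ∈ u, q x a = false) (hv : ∀ b ∈ v, q x b = true) :
    PySem.List.insertBy q x (u ++ v) = u ++ x :: v := by
  induction u with
  | nil =>
    cases v with
    | nil => rfl
    | cons b v => simp [PySem.List.insertBy, hv b (by simp)]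
  | cons a u ih =>
    have ha : q x a = false := hu a (by simp)
    simp only [List.cons_append, PySem.List.insertBy, ha]
    simp [ih (fun a' ha' => hu a' (by simp [ha']))]

theorem pv_set_update_of_subset (s : PySem.Set String) (xs : List String)
    (h : ∀ x ∈ xs, x ∈ s) : PySem.Set.update s xs = s := by
  induction xs generalizing s with
  | nil => rfl
  | cons x xs ih =>
    rw [PySem.Set.update_cons, PySem.Set.add_of_mem (h x (by simp))]
    exact ih s (fun y hy => h y (List.mem_cons_of_mem _ hy))

-- the literal reverse table
theorem pvLtc_eq : pvLtc = PySem.Dict.mk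
    [("b","\x08"),("t","\x09"),("n","\x0A"),("r","\x0D"),("f","\x0C"),("a","\x07"),("v","\x0B")] := by decide

theorem pvPat0_getD (c : String) : pvPat0.getD c [] = [] := by
  show (PySem.Dict.mk [("\x08",[]),("\x09",[]),("\x0A",[]),("\x0D",[]),("\x0C",[]),("\x07",[]),("\x0B",[])]).getD c [] = []
  simp [PySem.Dict.getD_eq_get?_getD, PySem.Dict.get?_mk_cons]
  split_ifs <;> rfl

theorem pvB0_getD (c : String) : pvB0.getD c PySem.Dict.empty = PySem.Dict.empty := by
  show (PySem.Dict.mk [("\x08",PySem.Dict.empty),("\x09",PySem.Dict.empty),("\x0A",PySem.Dict.empty),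
    ("\x0D",PySem.Dict.empty),("\x0C",PySem.Dict.empty),("\x07",PySem.Dict.empty),("\x0B",PySem.Dict.empty)]).getD c PySem.Dict.empty = PySem.Dict.empty
  simp [PySem.Dict.getD_eq_get?_getD, PySem.Dict.get?_mk_cons]
  split_ifs <;> rfl

theorem pvLtc_getD_mem (s : String) (h : pvLtc.contains s = true) : pvLtc.getD s "" ∈ pvK7 := by
  rw [pvLtc_eq] at h ⊢
  simp [PySem.Dict.getD_eq_get?_getD, PySem.Dict.get?_mk_cons]
  simp [PySem.Dict.contains_mk] at h
  split_ifs <;> first | decide | simp_all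

theorem pvLookup (c l : String) (hcl : (c, l) ∈ pvCtrlA) (s : String) :
    (pvLtc.contains s && (pvLtc.getD s "" == c)) = (s == l) := by
  rw [pvLtc_eq]
  by_cases hmem : s ∈ (["b", "t", "n", "r", "f", "a", "v"] : List String)
  · fin_cases hcl <;> fin_cases hmem <;> decide
  · simp only [List.mem_cons, List.not_mem_nil, or_false, not_or] at hmem
    obtain ⟨n1, n2, n3, n4, n5, n6, n7⟩ := hmem
    have r : ∀ a b : String, a ≠ b → (a == b) = false := fun a b h => beq_eq_false_iff_ne.mpr h
    simp [PySem.Dict.contains_mk, r _ _ (fun e => n1 e.symm), r _ _ (fun e => n2 e.symm),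
      r _ _ (fun e => n3 e.symm), r _ _ (fun e => n4 e.symm), r _ _ (fun e => n5 e.symm),
      r _ _ (fun e => n6 e.symm), r _ _ (fun e => n7 e.symm)]
    fin_cases hcl <;> assumption

theorem pvHit_any (c l : String) (hcl : (c, l) ∈ pvCtrlA) (t : String) (h : pvHit l t = true) :
    pvAny t = true := by
  simp only [pvHit, Bool.and_eq_true, beq_iff_eq] at h
  obtain ⟨h1, h2⟩ := h
  simp only [pvAny, h1, h2, Bool.true_and]
  fin_cases hcl <;> decide

-- ===== A-side characterisation =====
theorem pvModFold_getD (l : List (String × String)) (d : PySem.Dict String (List (String × String)))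
    (v : String × String) (c : String) :
    (l.foldl (fun d cp => d.modify cp.1 [] (fun w => w ++ [v])) d).getD c []
      = d.getD c [] ++ (l.filter (fun cp => cp.1 == c)).map (fun _ => v) := by
  induction l generalizing d with
  | nil => simp
  | cons cp l ih =>
    simp only [List.foldl_cons, List.filter_cons]
    rw [ih, PySem.Dict.getD_modify]
    by_cases h : cp.1 = c
    · simp [h]
    · rw [if_neg (fun hh => h hh.symm)]
      simp [h]

theorem pvStepA_getD (c l : String) (hcl : (c, l) ∈ pvCtrlA)
    (pats : PySem.Dict String (List (String × String))) (t : String) :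
    (pvStepA pats t).getD c [] = pats.getD c [] ++ (if pvHit l t then [(pvSuffix t, t)] else []) := by
  unfold pvStepA
  by_cases h1 : (PySem.Str.startswith t "\\" && decide (1 < PySem.Str.len t)) = true
  · rw [if_pos h1, PySem.List.foldl_if_eq_foldl_filter, pvModFold_getD]
    congr 1
    rw [List.filter_filter]
    have hh : pvHit l t = (PySem.Str.slice t (some 1) (some 2) == l) := by
      simp only [pvHit, h1, Bool.true_and]
    rw [hh, pvSuffix]
    fin_cases hcl <;> split_ifs with hs <;> simp_all [pvCtrlA]
  · rw [if_neg h1]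
    have hh : pvHit l t = false := by
      simp only [Bool.not_eq_true] at h1
      simp only [pvHit, h1, Bool.false_and]
    rw [hh]
    simp

theorem pvLoopA_getD (c l : String) (hcl : (c, l) ∈ pvCtrlA) (toks : List String)
    (pats : PySem.Dict String (List (String × String))) :
    (toks.foldl pvStepA pats).getD c [] = pats.getD c [] ++ pvColl l toks := by
  induction toks generalizing pats with
  | nil => simp [pvColl]
  | cons t ts ih =>
    simp only [List.foldl_cons]
    rw [ih, pvStepA_getD c l hcl]
    unfold pvColl
    by_cases h : pvHit l t = true <;> simp [h]

theorem pvStepA_keys (pats : PySem.Dict String (List (String × String))) (t : String)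
    (h : pats.keys = pvK7) : (pvStepA pats t).keys = pvK7 := by
  unfold pvStepA
  by_cases h1 : (PySem.Str.startswith t "\\" && decide (1 < PySem.Str.len t)) = true
  · rw [if_pos h1, PySem.List.foldl_if_eq_foldl_filter, PySem.Dict.keys_foldl_modify_key, h]
    apply pv_set_update_of_subset
    intro x hx
    simp only [List.mem_map] at hx
    obtain ⟨cp, hcp, rfl⟩ := hx
    have hmem : cp ∈ pvCtrlA := List.mem_of_mem_filter hcp
    have hall : ∀ cp ∈ pvCtrlA, cp.1 ∈ pvK7 := by decide
    exact hall cp hmem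
  · rw [if_neg h1]; exact h

theorem pvLoopA_keys (toks : List String) (pats : PySem.Dict String (List (String × String)))
    (h : pats.keys = pvK7) : (toks.foldl pvStepA pats).keys = pvK7 := by
  induction toks generalizing pats with
  | nil => exact h
  | cons t ts ih => exact ih _ (pvStepA_keys pats t h)

theorem pvA_eq (m : List (String × Int)) :
    build_escape_patterns_py m =
      (((PySem.List.dedup (m.map Prod.fst)).foldl pvStepA pvPat0).items).map
        (fun p => (p.1, PySem.List.sorted p.2 (fun x => PySem.Str.len x.1) true)) := rfl

theorem pvA_char (m : List (String × Int)) : build_escape_patterns_py m = pvRHS m := by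
  rw [pvA_eq]
  have hkeys : ((PySem.List.dedup (m.map Prod.fst)).foldl pvStepA pvPat0).keys = pvK7 :=
    pvLoopA_keys _ _ (by decide)
  rw [PySem.Dict.items_eq_map_keys _ (by rw [hkeys]; decide) [], hkeys]
  rw [show pvK7 = pvCtrlA.map Prod.fst from by decide, List.map_map, List.map_map]
  unfold pvRHS
  apply List.map_congr_left
  intro cl hcl
  simp only [Function.comp_apply]
  rw [pvLoopA_getD cl.1 cl.2 (by rwa [Prod.mk.eta]), pvPat0_getD, List.nil_append]
  congr 1
  unfold pvColl
  rw [pv_sorted_rev_map]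

-- ===== B-side characterisation =====
theorem pvLen_nonneg (s : String) : 0 ≤ PySem.Str.len s := by
  rw [PySem.Str.len_eq]; exact Int.natCast_nonneg _

theorem pvStepB_getD (c l : String) (hcl : (c, l) ∈ pvCtrlA) (n : Int)
    (st : PySem.Dict String (PySem.Dict Int (List (String × String))) × Int) (t : String) :
    ((pvStepB st t).1.getD c PySem.Dict.empty).getD n []
      = ((st.1.getD c PySem.Dict.empty).getD n [])
        ++ (if pvHit l t && (PySem.Str.len (pvSuffix t) == n) then [(pvSuffix t, t)] else []) := by
  have hlook := pvLookup c l hcl (PySem.Str.slice t (some 1) (some 2))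
  unfold pvStepB
  by_cases h1 : (PySem.Str.startswith t "\\" && decide (1 < PySem.Str.len t)) = true
  · by_cases h2 : pvLtc.contains (PySem.Str.slice t (some 1) (some 2)) = true
    · rw [if_pos (by rw [h1, h2]; rfl)]
      by_cases hc : c = pvLtc.getD (PySem.Str.slice t (some 1) (some 2)) ""
      · have hsl : (PySem.Str.slice t (some 1) (some 2) == l) = true := by
          rw [← hlook, h2, Bool.true_and, hc]
          exact beq_self_eq_true _
        have hhit : pvHit l t = true := by unfold pvHit; rw [h1, hsl]; rfl
        rw [PySem.Dict.getD_modify, if_pos hc, hc, PySem.Dict.getD_modify]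
        rw [hhit, Bool.true_and]
        simp only [pvSuffix]
        by_cases hn : n = PySem.Str.len (PySem.Str.slice t (some 2) none)
        · subst hn
          rw [if_pos rfl, if_pos (beq_self_eq_true _)]
        · rw [if_neg hn,
            if_neg (fun hb : (_ == _) = true => hn (beq_iff_eq.mp hb).symm),
            List.append_nil]
      · have hsl : (PySem.Str.slice t (some 1) (some 2) == l) = false := by
          rw [← hlook, h2, Bool.true_and]
          exact beq_eq_false_iff_ne.mpr (fun e => hc e.symm)
        have hhit : pvHit l t = false := by unfold pvHit; rw [hsl, Bool.and_false]
        rw [PySem.Dict.getD_modify, if_neg hc, hhit, Bool.false_and,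
          if_neg Bool.false_ne_true, List.append_nil]
    · have h2' : pvLtc.contains (PySem.Str.slice t (some 1) (some 2)) = false := by
        cases hx : pvLtc.contains (PySem.Str.slice t (some 1) (some 2)) with
        | true => exact absurd hx h2
        | false => rfl
      have hsl : (PySem.Str.slice t (some 1) (some 2) == l) = false := by
        rw [← hlook, h2', Bool.false_and]
      have hhit : pvHit l t = false := by unfold pvHit; rw [hsl, Bool.and_false]
      rw [if_neg (fun hcond => h2 ((Bool.and_eq_true _ _) ▸ hcond).2),
        hhit, Bool.false_and, if_neg Bool.false_ne_true, List.append_nil]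
  · have h1' : (PySem.Str.startswith t "\\" && decide (1 < PySem.Str.len t)) = false := by
      cases hx : (PySem.Str.startswith t "\\" && decide (1 < PySem.Str.len t)) with
      | true => exact absurd hx h1
      | false => rfl
    have hhit : pvHit l t = false := by unfold pvHit; rw [h1', Bool.false_and]
    rw [if_neg (fun hcond => h1 ((Bool.and_eq_true _ _) ▸ hcond).1),
      hhit, Bool.false_and, if_neg Bool.false_ne_true, List.append_nil]

theorem pvLoopB_getD (c l : String) (hcl : (c, l) ∈ pvCtrlA) (n : Int) (toks : List String)
    (st : PySem.Dict String (PySem.Dict Int (List (String × String))) × Int) :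
    (((toks.foldl pvStepB st).1.getD c PySem.Dict.empty).getD n [])
      = ((st.1.getD c PySem.Dict.empty).getD n [])
        ++ ((toks.filter (fun t => pvHit l t && (PySem.Str.len (pvSuffix t) == n))).map
            (fun t => (pvSuffix t, t))) := by
  induction toks generalizing st with
  | nil => rw [List.foldl_nil, List.filter_nil, List.map_nil, List.append_nil]
  | cons t ts ih =>
    simp only [List.foldl_cons, List.filter_cons]
    rw [ih, pvStepB_getD c l hcl]
    by_cases h : (pvHit l t && (PySem.Str.len (pvSuffix t) == n)) = true
    · rw [if_pos h, if_pos h, List.map_cons, List.append_assoc, List.singleton_append]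
    · rw [if_neg h, if_neg h, List.append_nil]

-- the per-bucket, per-length group is the length-filtered pvColl
theorem pvGroup_eq (l : String) (n : Int) (toks : List String) :
    ((toks.filter (fun t => pvHit l t && (PySem.Str.len (pvSuffix t) == n))).map
        (fun t => (pvSuffix t, t)))
      = (pvColl l toks).filter (fun x => PySem.Str.len x.1 == n) := by
  unfold pvColl
  rw [List.filter_map, List.filter_filter]
  refine congrArg (List.map _) (List.filter_congr ?_)
  intro t _
  simp only [Function.comp]
  exact Bool.and_comm _ _

-- the running maximum st.2
theorem pvStepB_snd_le (st : PySem.Dict String (PySem.Dict Int (List (String × String))) × Int)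
    (t : String) : st.2 ≤ (pvStepB st t).2 := by
  unfold pvStepB
  split_ifs <;> simp_all [PySem.Str.len_eq] <;> omega

theorem pvLoopB_snd_mono (toks : List String)
    (st : PySem.Dict String (PySem.Dict Int (List (String × String))) × Int) :
    st.2 ≤ (toks.foldl pvStepB st).2 := by
  induction toks generalizing st with
  | nil => simp
  | cons t ts ih => exact le_trans (pvStepB_snd_le st t) (ih _)

theorem pvLoopB_snd_bound (c l : String) (hcl : (c, l) ∈ pvCtrlA) (toks : List String)
    (st : PySem.Dict String (PySem.Dict Int (List (String × String))) × Int) :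
    ∀ t ∈ toks, pvHit l t = true →
      PySem.Str.len (pvSuffix t) ≤ (toks.foldl pvStepB st).2 := by
  induction toks generalizing st with
  | nil => simp
  | cons x xs ih =>
    intro t ht hhit
    rcases List.mem_cons.mp ht with rfl | hmem
    · have hany := pvHit_any c l hcl t hhit
      have hstep : PySem.Str.len (pvSuffix t) ≤ (pvStepB st t).2 := by
        unfold pvStepB
        rw [if_pos (by simpa only [pvAny] using hany)]
        simp only [pvSuffix]
        split_ifs <;> omega
      simp only [List.foldl_cons]
      exact le_trans hstep (pvLoopB_snd_mono xs _)
    · simp only [List.foldl_cons]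
      exact ih _ t hmem hhit

-- keys of the outer bucket dict stay the seven control chars
theorem pvStepB_keys (st : PySem.Dict String (PySem.Dict Int (List (String × String))) × Int)
    (t : String) (h : st.1.keys = pvK7) : (pvStepB st t).1.keys = pvK7 := by
  unfold pvStepB
  by_cases hc : ((PySem.Str.startswith t "\\" && decide (1 < PySem.Str.len t))
      && pvLtc.contains (PySem.Str.slice t (some 1) (some 2))) = true
  · rw [if_pos hc]
    have h2 : pvLtc.contains (PySem.Str.slice t (some 1) (some 2)) = true := by
      simp only [Bool.and_eq_true] at hc; exact hc.2
    have hk : pvLtc.getD (PySem.Str.slice t (some 1) (some 2)) "" ∈ pvK7 := pvLtc_getD_mem _ h2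
    have hcont : st.1.contains (pvLtc.getD (PySem.Str.slice t (some 1) (some 2)) "") = true := by
      rw [PySem.Dict.contains_iff_mem_keys, h]; exact hk
    simp only
    rw [PySem.Dict.keys_modify, PySem.Dict.keys_insert_of_contains _ _ hcont, h]
  · rw [if_neg hc]; exact h

theorem pvLoopB_keys (toks : List String)
    (st : PySem.Dict String (PySem.Dict Int (List (String × String))) × Int)
    (h : st.1.keys = pvK7) : (toks.foldl pvStepB st).1.keys = pvK7 := by
  induction toks generalizing st with
  | nil => exact h
  | cons t ts ih => exact ih _ (pvStepB_keys st t h)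

-- counting-sort emission: counting the lengths down from M reproduces the stable
-- descending-by-key sort, for any list whose keys lie in [0, M]
theorem pv_countdown_sorted {α : Type} (key : α → Int) (M : Int) (l : List α)
    (h : ∀ x ∈ l, 0 ≤ key x ∧ key x ≤ M) :
    (PySem.List.pyRange M (-1) (-1)).flatMap (fun n => l.filter (fun a => key a == n))
      = PySem.List.sorted l key true := by
  induction l using List.reverseRecOn with
  | nil => rw [PySem.List.sorted_rev_eq_foldl_insertBy]; simp
  | append_singleton l x ih =>
    obtain ⟨hx0, hxM⟩ := h x (by simp)
    have hl : ∀ y ∈ l, 0 ≤ key y ∧ key y ≤ M := fun y hy => h y (by simp [hy])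
    -- split the countdown range at key x
    have hsplit : PySem.List.pyRange M (-1) (-1)
        = (PySem.List.pyRange (key x + 1) (M + 1)).reverse ++ [key x]
          ++ (PySem.List.pyRange 0 (key x)).reverse := by
      rw [PySem.List.pyRange_neg_one_eq_reverse]
      rw [show (-1 : Int) + 1 = 0 from rfl]
      rw [PySem.List.pyRange_one_append 0 (key x) (M + 1) hx0 (by omega)]
      rw [PySem.List.pyRange_one_append (key x) (key x + 1) (M + 1) (by omega) (by omega)]
      rw [PySem.List.pyRange_one_singleton]
      simp
    have hfilt : ∀ n : Int, (l ++ [x]).filter (fun a => key a == n)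
        = l.filter (fun a => key a == n) ++ (if key x == n then [x] else []) := by
      intro n
      rw [List.filter_append]
      congr 1
      by_cases hn : (key x == n) = true <;> simp [hn]
    have hhigh : ∀ n ∈ (PySem.List.pyRange (key x + 1) (M + 1)).reverse,
        (l ++ [x]).filter (fun a => key a == n) = l.filter (fun a => key a == n) := by
      intro n hn
      rw [List.mem_reverse, PySem.List.mem_pyRange_one] at hn
      rw [hfilt n, if_neg (by simp; omega)]
      simp
    have hlow : ∀ n ∈ (PySem.List.pyRange 0 (key x)).reverse,
        (l ++ [x]).filter (fun a => key a == n) = l.filter (fun a => key a == n) := by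
      intro n hn
      rw [List.mem_reverse, PySem.List.mem_pyRange_one] at hn
      rw [hfilt n, if_neg (by simp; omega)]
      simp
    rw [hsplit]
    rw [List.flatMap_append, List.flatMap_append]
    rw [List.flatMap_congr hhigh, List.flatMap_congr hlow]
    have hmid : List.flatMap (fun n => (l ++ [x]).filter (fun a => key a == n)) [key x]
        = l.filter (fun a => key a == key x) ++ [x] := by
      simp only [List.flatMap_cons, List.flatMap_nil, List.append_nil]
      rw [hfilt (key x), if_pos (by simp)]
    rw [hmid]
    -- sorted side
    rw [pv_sorted_rev_append_singleton, ← ih hl, hsplit,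
      List.flatMap_append, List.flatMap_append]
    have hmid' : List.flatMap (fun n => l.filter (fun a => key a == n)) [key x]
        = l.filter (fun a => key a == key x) := by
      simp
    rw [hmid']
    rw [show (List.flatMap (fun n => l.filter (fun a => key a == n))
          (PySem.List.pyRange (key x + 1) (M + 1)).reverse
        ++ l.filter (fun a => key a == key x))
        ++ List.flatMap (fun n => l.filter (fun a => key a == n))
          (PySem.List.pyRange 0 (key x)).reverse
      = (List.flatMap (fun n => l.filter (fun a => key a == n))
          (PySem.List.pyRange (key x + 1) (M + 1)).reverse
        ++ l.filter (fun a => key a == key x))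
        ++ List.flatMap (fun n => l.filter (fun a => key a == n))
          (PySem.List.pyRange 0 (key x)).reverse from rfl]
    rw [pv_insertBy_split]
    · simp
    · intro a ha
      rcases List.mem_append.mp ha with ha | ha
      · rw [List.mem_flatMap] at ha
        obtain ⟨n, hn, hain⟩ := ha
        rw [List.mem_reverse, PySem.List.mem_pyRange_one] at hn
        have := List.of_mem_filter hain
        simp only [beq_iff_eq] at this
        simp only [decide_eq_false_iff_not, not_lt]
        omega
      · have := List.of_mem_filter ha
        simp only [beq_iff_eq] at this
        simp only [decide_eq_false_iff_not, not_lt]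
        omega
    · intro b hb
      rw [List.mem_flatMap] at hb
      obtain ⟨n, hn, hbin⟩ := hb
      rw [List.mem_reverse, PySem.List.mem_pyRange_one] at hn
      have := List.of_mem_filter hbin
      simp only [beq_iff_eq] at this
      simp only [decide_eq_true_eq]
      omega

theorem pvB_eq (m : List (String × Int)) :
    build_escape_patterns_py_alt m =
      (let st := (PySem.List.dedup (m.map Prod.fst)).foldl pvStepB (pvB0, (-1 : Int))
       ((st.1.items).foldl (fun pats cb =>
          pats.insert cb.1
            ((PySem.List.pyRange st.2 (-1) (-1)).foldl (fun out n => out ++ cb.2.getD n []) []))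
        PySem.Dict.empty).items) := rfl

theorem pvB_char (m : List (String × Int)) : build_escape_patterns_py_alt m = pvRHS m := by
  rw [pvB_eq]
  simp only
  set toks := PySem.List.dedup (m.map Prod.fst) with htoks
  set st := toks.foldl pvStepB (pvB0, (-1 : Int)) with hst
  have hkeys : st.1.keys = pvK7 := pvLoopB_keys _ _ (by decide)
  have hnd : (st.1.items.map Prod.fst).Nodup := by
    show st.1.keys.Nodup
    rw [hkeys]; decide
  rw [PySem.Dict.items_foldl_insert_fresh st.1.items Prod.fst _ PySem.Dict.empty
        (fun a _ => by simp [PySem.Dict.contains_empty]) hnd]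
  rw [show (PySem.Dict.empty : PySem.Dict String (List (String × String))).items = [] from rfl,
    List.nil_append]
  rw [PySem.Dict.items_eq_map_keys st.1 (by rw [hkeys]; decide) PySem.Dict.empty, hkeys]
  rw [List.map_map]
  rw [show pvK7 = pvCtrlA.map Prod.fst from by decide, List.map_map]
  unfold pvRHS
  apply List.map_congr_left
  intro cl hcl
  have hcl' : (cl.1, cl.2) ∈ pvCtrlA := by rwa [Prod.mk.eta]
  simp only [Function.comp_apply]
  congr 1
  -- the emitted bucket
  rw [PySem.List.foldl_append_eq_flatMap, List.nil_append]
  have hG : ∀ n : Int, ((st.1.getD cl.1 PySem.Dict.empty).getD n [])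
      = (pvColl cl.2 toks).filter (fun x => PySem.Str.len x.1 == n) := by
    intro n
    rw [hst, pvLoopB_getD cl.1 cl.2 hcl' n, pvB0_getD]
    rw [show (PySem.Dict.empty : PySem.Dict Int (List (String × String))).getD n [] = [] from rfl,
      List.nil_append]
    exact pvGroup_eq cl.2 n toks
  rw [List.flatMap_congr (fun n _ => hG n)]
  rw [pv_countdown_sorted (fun x => PySem.Str.len x.1) st.2 (pvColl cl.2 toks) ?bounds]
  · unfold pvColl
    rw [pv_sorted_rev_map]
  case bounds =>
    intro x hx
    unfold pvColl at hx
    rw [List.mem_map] at hx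
    obtain ⟨t, ht, rfl⟩ := hx
    have hmem : t ∈ toks := List.mem_of_mem_filter ht
    have hhit : pvHit cl.2 t = true := List.of_mem_filter ht
    exact ⟨pvLen_nonneg _, pvLoopB_snd_bound cl.1 cl.2 hcl' toks _ t hmem hhit⟩

-- ===== VERDICT (by name: the statement is the Claim_ definition above) =====
theorem build_escape_patterns_py_spec : Claim_equal_build_escape_patterns_py := by
  intro m _h
  unfold Spec_build_escape_patterns_py
  rw [pvA_char, pvB_char]
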